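-- pv_equiv track=rewrite | github.com/Hrishikeshgupta2002/web2llmstxt | app.py | limit_pages
-- ===== SOURCE A (Python) =====
-- def limit_pages(full_text: str, max_pages: int) -> str:
--     """Limit the number of pages in full text output"""
--     pages = full_text.split('<|crawl4ai-page-')
--     if len(pages) <= 1:
--         return full_text
--
--     # First element is the header
--     result = pages[0]
--
--     # Add up to max_pages
--     for i in range(1, min(len(pages), max_pages + 1)):
--         result += '<|crawl4ai-page-' + pages[i]
--
--     return result
-- ===== SOURCE B (Python) =====
-- def limit_pages(full_text: str, max_pages: int) -> str:
--     """Limit the number of pages in full text output"""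
--     delim = '<|crawl4ai-page-'
--     pos = full_text.find(delim)
--     if pos == -1:
--         return full_text
--     remaining = max_pages
--     while remaining > 0:
--         nxt = full_text.find(delim, pos + len(delim))
--         if nxt == -1:
--             return full_text
--         pos = nxt
--         remaining -= 1
--     return full_text[:pos]
-- ===== Notes on version B (the rewrite author's own statement) =====
-- stated objective: alternative
-- what changed: Instead of splitting the text into a list of pages and re-concatenating the first max_pages of them with the delimiter, B walks forward with repeated str.find to locate the start of the (max_pages+1)-th delimiter occurrence and returns a single slice full_text[:pos] (or full_text unchanged when the budget covers all pages).
import Mathlib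
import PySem

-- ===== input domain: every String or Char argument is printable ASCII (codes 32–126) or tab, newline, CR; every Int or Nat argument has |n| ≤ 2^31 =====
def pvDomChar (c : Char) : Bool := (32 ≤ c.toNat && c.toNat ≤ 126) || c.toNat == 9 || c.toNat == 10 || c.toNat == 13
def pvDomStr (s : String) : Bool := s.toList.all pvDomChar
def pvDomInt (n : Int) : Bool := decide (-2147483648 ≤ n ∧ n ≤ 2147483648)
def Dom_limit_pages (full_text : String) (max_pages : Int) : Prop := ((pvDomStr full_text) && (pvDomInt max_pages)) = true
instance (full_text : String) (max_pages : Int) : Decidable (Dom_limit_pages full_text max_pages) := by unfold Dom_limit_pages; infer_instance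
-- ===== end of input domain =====

-- B replaces A's split-into-pages-and-reconcatenate loop by walking forward with repeated find and returning one slice (alternative decomposition, same cost).


-- the page delimiter literal '<|crawl4ai-page-' (shared by both ports)
def pvDelim : List Char := "<|crawl4ai-page-".toList

-- ===== PORT A =====
def limit_pages (full_text : String) (max_pages : Int) : String :=
  let pages := PySem.Chars.splitOn full_text.toList pvDelim
  if (pages.length : Int) ≤ 1 then full_text
  else
    let result := PySem.List.pyGetD pages 0 []
    let result := (PySem.List.pyRange 1 (min (pages.length : Int) (max_pages + 1))).foldl
        (fun acc i => acc ++ (pvDelim ++ PySem.List.pyGetD pages i [])) result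
    String.ofList result

-- ===== PORT B =====
-- the while-loop of Source B: pos is the start of the current delimiter occurrence, remaining the page budget
def limit_pages_altLoop (s : List Char) (pos : Nat) (remaining : Int) : List Char :=
  if 0 < remaining then
    let nxt := PySem.Chars.findFrom s pvDelim ((pos : Int) + (pvDelim.length : Int)) none
    if nxt = -1 then s
    else limit_pages_altLoop s nxt.toNat (remaining - 1)
  else PySem.Chars.slice s none (some (pos : Int))
termination_by remaining.toNat
decreasing_by omega

def limit_pages_alt (full_text : String) (max_pages : Int) : String :=
  let s := full_text.toList
  let pos := PySem.Chars.find s pvDelim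
  if pos = -1 then full_text
  else String.ofList (limit_pages_altLoop s pos.toNat max_pages)

-- ===== PRECONDITION & SPEC =====
def Spec_limit_pages (full_text : String) (max_pages : Int) (out : String) : Prop := out = limit_pages_alt full_text max_pages
instance (full_text : String) (max_pages : Int) (out : String) : Decidable (Spec_limit_pages full_text max_pages out) := by unfold Spec_limit_pages; infer_instance

-- ===== CLAIM (what is proved, stated in full; the proofs are below) =====
def Claim_equal_limit_pages : Prop := ∀ (full_text : String) (max_pages : Int), Dom_limit_pages full_text max_pages → Spec_limit_pages full_text max_pages (limit_pages full_text max_pages)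

-- ===== LEMMAS AND PROOFS =====

lemma pvDelim_len : pvDelim.length = 16 := by decide

-- apply f to the head of a list only
def pvMapHead (f : List Char → List Char) : List (List Char) → List (List Char)
  | [] => []
  | h :: t => f h :: t

-- accumulator-free version of PySem.Chars.splitOn.go for the fixed separator pvDelim
def pvSpGo : List Char → List (List Char)
  | [] => [[]]
  | c :: rest =>
    if pvDelim.isPrefixOf (c :: rest) then [] :: pvSpGo ((c :: rest).drop pvDelim.length)
    else pvMapHead (c :: ·) (pvSpGo rest)
termination_by l => l.length
decreasing_by
  · simp [pvDelim_len]
  · simp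

lemma pvMapHead_mapHead (f g : List Char → List Char) (xs : List (List Char)) :
    pvMapHead f (pvMapHead g xs) = pvMapHead (fun x => f (g x)) xs := by
  cases xs <;> simp [pvMapHead]

lemma pv_splitOn_go_eq : ∀ (fuel : Nat) (l cur : List Char) (acc : List (List Char)), l.length < fuel →
    PySem.Chars.splitOn.go pvDelim fuel l cur acc = acc.reverse ++ pvMapHead (cur.reverse ++ ·) (pvSpGo l) := by
  intro fuel
  induction fuel with
  | zero => intro l cur acc h; omega
  | succ fuel ih =>
    intro l cur acc h
    cases l with
    | nil => simp [PySem.Chars.splitOn.go, pvSpGo, pvMapHead]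
    | cons c rest =>
      rw [PySem.Chars.splitOn.go]
      by_cases hp : pvDelim.isPrefixOf (c :: rest) = true
      · simp only [hp, if_true]
        rw [ih ((c :: rest).drop pvDelim.length) [] (cur.reverse :: acc)
            (by simp [pvDelim_len] at *; omega)]
        rw [pvSpGo]
        simp only [hp, if_true, pvMapHead, List.reverse_cons, List.reverse_nil,
          List.nil_append, List.append_assoc, List.singleton_append]
        cases pvSpGo (List.drop pvDelim.length (c :: rest)) <;> simp [pvMapHead]
      · simp only [hp, if_false, Bool.false_eq_true]
        rw [ih rest (c :: cur) acc (by simp at h; omega)]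
        have hgo : pvSpGo (c :: rest) = pvMapHead (c :: ·) (pvSpGo rest) := by
          rw [pvSpGo]; simp [hp]
        rw [hgo, pvMapHead_mapHead]
        cases pvSpGo rest <;> simp [pvMapHead]

lemma pv_splitOn_eq (l : List Char) : PySem.Chars.splitOn l pvDelim = pvSpGo l := by
  unfold PySem.Chars.splitOn
  rw [pv_splitOn_go_eq (l.length + 1) l [] [] (by omega)]
  cases pvSpGo l <;> simp [pvMapHead]

lemma pv_find_go_shift (sub : List Char) : ∀ (l : List Char) (k : Nat),
    PySem.Chars.find.go sub l k =
      if PySem.Chars.find.go sub l 0 = -1 then -1 else (k : Int) + PySem.Chars.find.go sub l 0 := by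
  intro l
  induction l with
  | nil =>
    intro k
    simp only [PySem.Chars.find.go]
    by_cases he : sub.isEmpty = true <;> simp [he]
  | cons c t ih =>
    intro k
    rw [PySem.Chars.find.go]
    conv_rhs => rw [PySem.Chars.find.go]
    by_cases hp : sub.isPrefixOf (c :: t) = true
    · simp only [hp, if_true]
      norm_num
    · simp only [hp, if_false, Bool.false_eq_true]
      rw [ih (k + 1), ih 1]
      have hgef : -1 ≤ PySem.Chars.find.go sub t 0 := PySem.Chars.neg_one_le_find t sub
      split_ifs <;> push_cast <;> omega

lemma pv_spGo_eq (l : List Char) :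
    pvSpGo l = if PySem.Chars.find l pvDelim = -1 then [l]
      else l.take (PySem.Chars.find l pvDelim).toNat ::
        pvSpGo (l.drop ((PySem.Chars.find l pvDelim).toNat + pvDelim.length)) := by
  induction l with
  | nil =>
    have hn : PySem.Chars.find [] pvDelim = -1 := by decide
    simp [hn, pvSpGo]
  | cons c t ih =>
    have hfind : PySem.Chars.find (c :: t) pvDelim = PySem.Chars.find.go pvDelim (c :: t) 0 := rfl
    rw [hfind, PySem.Chars.find.go]
    by_cases hp : pvDelim.isPrefixOf (c :: t) = true
    · simp only [hp, if_true]
      have hs : pvSpGo (c :: t) = [] :: pvSpGo ((c :: t).drop pvDelim.length) := by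
        rw [pvSpGo]; simp [hp]
      simp [hs]
    · simp only [hp, if_false, Bool.false_eq_true]
      rw [pv_find_go_shift pvDelim t 1]
      push_cast
      have htf : PySem.Chars.find t pvDelim = PySem.Chars.find.go pvDelim t 0 := rfl
      have hs : pvSpGo (c :: t) = pvMapHead (c :: ·) (pvSpGo t) := by
        rw [pvSpGo]; simp [hp]
      rw [← htf]
      by_cases h0 : PySem.Chars.find t pvDelim = -1
      · simp only [h0, if_true]
        rw [hs, ih]
        simp [h0, pvMapHead]
      · have hge : 0 ≤ PySem.Chars.find t pvDelim := by
          have := PySem.Chars.neg_one_le_find t pvDelim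
          omega
        have hne : ¬ ((1 : Int) + PySem.Chars.find t pvDelim = -1) := by omega
        simp only [h0, if_false, hne]
        rw [hs, ih]
        simp only [h0, ite_false, pvMapHead]
        have h1 : ((1 : Int) + PySem.Chars.find t pvDelim).toNat
            = (PySem.Chars.find t pvDelim).toNat + 1 := by omega
        have h2 : (PySem.Chars.find t pvDelim).toNat + 1 + pvDelim.length
            = ((PySem.Chars.find t pvDelim).toNat + pvDelim.length) + 1 := by omega
        rw [h1, h2, List.take_succ_cons, List.drop_succ_cons]

lemma pv_spGo_ne_nil (l : List Char) : pvSpGo l ≠ [] := by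
  rw [pv_spGo_eq]
  split <;> simp

-- the page budget join: head piece, then up to n further pieces each preceded by the delimiter
def pvJoin : List (List Char) → Nat → List Char
  | [], _ => []
  | [p], _ => p
  | p :: _ :: _, 0 => p
  | p :: q :: r, n + 1 => p ++ pvDelim ++ pvJoin (q :: r) n

lemma pvJoin_eq_flatMap : ∀ (rest : List (List Char)) (p : List Char) (n : Nat),
    pvJoin (p :: rest) n = p ++ (rest.take n).flatMap (fun q => pvDelim ++ q) := by
  intro rest
  induction rest with
  | nil => intro p n; cases n <;> simp [pvJoin]
  | cons q r ih =>
    intro p n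
    cases n with
    | zero => simp [pvJoin]
    | succ n => simp [pvJoin, ih q n]

lemma pv_drop_lt (s : List Char) (h : ¬ PySem.Chars.find s pvDelim = -1) :
    (s.drop ((PySem.Chars.find s pvDelim).toNat + pvDelim.length)).length < s.length := by
  have hge : 0 ≤ PySem.Chars.find s pvDelim := by
    have := PySem.Chars.neg_one_le_find s pvDelim
    omega
  have hlen := (PySem.Chars.find_spec hge).1.length_le
  rw [List.length_drop] at hlen
  rw [List.length_drop]
  have h16 : pvDelim.length = 16 := pvDelim_len
  omega

-- recursive cut: the common middle ground between A's split-and-rejoin and B's find loop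
def pvCut (s : List Char) (m : Int) : List Char :=
  let i := PySem.Chars.find s pvDelim
  if h : i = -1 then s
  else if m ≤ 0 then s.take i.toNat
  else s.take (i.toNat + pvDelim.length) ++ pvCut (s.drop (i.toNat + pvDelim.length)) (m - 1)
termination_by s.length
decreasing_by
  exact pv_drop_lt s h

lemma pvCut_none (s : List Char) (m : Int) (hf : PySem.Chars.find s pvDelim = -1) :
    pvCut s m = s := by
  rw [pvCut]; simp [hf]

lemma pvCut_found (s : List Char) (m : Int) (hf : ¬ PySem.Chars.find s pvDelim = -1) :
    pvCut s m = if m ≤ 0 then s.take (PySem.Chars.find s pvDelim).toNat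
      else s.take ((PySem.Chars.find s pvDelim).toNat + pvDelim.length) ++
        pvCut (s.drop ((PySem.Chars.find s pvDelim).toNat + pvDelim.length)) (m - 1) := by
  rw [pvCut]; simp [hf]

lemma pv_take_prefix_drop (s : List Char) (k : Nat) (h : pvDelim <+: s.drop k) :
    s.take (k + pvDelim.length) = s.take k ++ pvDelim := by
  rw [List.take_add]
  congr 1
  exact (List.prefix_iff_eq_take.mp h).symm

lemma pv_find_nonneg_parts (s : List Char) (hf : ¬ PySem.Chars.find s pvDelim = -1) :
    0 ≤ PySem.Chars.find s pvDelim ∧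
    pvDelim <+: s.drop (PySem.Chars.find s pvDelim).toNat ∧
    (PySem.Chars.find s pvDelim).toNat + pvDelim.length ≤ s.length := by
  have hge : 0 ≤ PySem.Chars.find s pvDelim := by
    have := PySem.Chars.neg_one_le_find s pvDelim
    omega
  have hpre := (PySem.Chars.find_spec hge).1
  have hlen : pvDelim.length ≤ (s.drop (PySem.Chars.find s pvDelim).toNat).length :=
    hpre.length_le
  simp only [List.length_drop, pvDelim_len] at hlen
  refine ⟨hge, hpre, ?_⟩
  rw [pvDelim_len]
  omega

lemma pv_cut_eq_join_aux : ∀ (n : Nat) (s : List Char), s.length ≤ n → ∀ (m : Int),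
    pvCut s m = pvJoin (pvSpGo s) m.toNat := by
  intro n
  induction n with
  | zero =>
    intro s hs m
    have hnil : s = [] := List.eq_nil_of_length_eq_zero (by omega)
    subst hnil
    have hn : PySem.Chars.find ([] : List Char) pvDelim = -1 := by decide
    rw [pvCut_none _ _ hn]
    simp [pvSpGo, pvJoin]
  | succ n ih =>
    intro s hs m
    by_cases hf : PySem.Chars.find s pvDelim = -1
    · rw [pvCut_none _ _ hf, pv_spGo_eq, if_pos hf]
      simp [pvJoin]
    · obtain ⟨hge, hpre, hlen⟩ := pv_find_nonneg_parts s hf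
      have hsp : pvSpGo s = s.take (PySem.Chars.find s pvDelim).toNat ::
          pvSpGo (s.drop ((PySem.Chars.find s pvDelim).toNat + pvDelim.length)) := by
        rw [pv_spGo_eq, if_neg hf]
      obtain ⟨q, r, hq⟩ : ∃ q r,
          pvSpGo (s.drop ((PySem.Chars.find s pvDelim).toNat + pvDelim.length)) = q :: r := by
        cases h' : pvSpGo (s.drop ((PySem.Chars.find s pvDelim).toNat + pvDelim.length)) with
        | nil => exact absurd h' (pv_spGo_ne_nil _)
        | cons q r => exact ⟨q, r, rfl⟩
      rw [pvCut_found _ _ hf]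
      by_cases hm : m ≤ 0
      · rw [if_pos hm, hsp, hq]
        have h0 : m.toNat = 0 := by omega
        rw [h0]
        simp [pvJoin]
      · rw [if_neg hm]
        rw [ih (s.drop ((PySem.Chars.find s pvDelim).toNat + pvDelim.length))
            (by simp [pvDelim_len] at *; omega) (m - 1)]
        rw [hsp, hq]
        have hm1 : m.toNat = (m - 1).toNat + 1 := by omega
        rw [hm1]
        show s.take ((PySem.Chars.find s pvDelim).toNat + pvDelim.length) ++
            pvJoin (q :: r) (m - 1).toNat
          = s.take (PySem.Chars.find s pvDelim).toNat ++ pvDelim ++ pvJoin (q :: r) (m - 1).toNat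
        rw [pv_take_prefix_drop s _ hpre]

lemma pv_cut_eq_join (s : List Char) (m : Int) : pvCut s m = pvJoin (pvSpGo s) m.toNat :=
  pv_cut_eq_join_aux s.length s le_rfl m

lemma pv_pyRange_nil (a b : Int) (h : b ≤ a) : PySem.List.pyRange a b = [] := by
  simp [PySem.List.pyRange]
  omega

lemma pv_range_flatMap (xs : List (List Char)) : ∀ (n aN : Nat), aN + n ≤ xs.length →
    (PySem.List.pyRange (aN : Int) ((aN : Int) + (n : Int))).flatMap
        (fun i => pvDelim ++ PySem.List.pyGetD xs i [])
      = ((xs.drop aN).take n).flatMap (fun q => pvDelim ++ q) := by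
  intro n
  induction n with
  | zero =>
    intro aN h
    rw [pv_pyRange_nil _ _ (by omega)]
    simp
  | succ n ih =>
    intro aN h
    rw [PySem.List.pyRange_one_cons (by push_cast; omega)]
    have hlt : aN < xs.length := by omega
    have h2 : (aN : Int) + ((n + 1 : Nat) : Int) = ((aN + 1 : Nat) : Int) + (n : Nat) := by
      push_cast; ring
    have h3 : (aN : Int) + 1 = ((aN + 1 : Nat) : Int) := by push_cast; ring
    rw [h2, h3, List.flatMap_cons, ih (aN + 1) (by omega)]
    rw [PySem.List.pyGetD_natCast, List.getD_eq_getElem xs [] hlt]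
    rw [List.drop_eq_getElem_cons hlt, List.take_succ_cons, List.flatMap_cons]

lemma pv_A_eq (full_text : String) (m : Int) :
    limit_pages full_text m = String.ofList (pvCut full_text.toList m) := by
  simp only [limit_pages, pv_splitOn_eq]
  by_cases hf : PySem.Chars.find full_text.toList pvDelim = -1
  · have hsp : pvSpGo full_text.toList = [full_text.toList] := by
      rw [pv_spGo_eq, if_pos hf]
    rw [hsp, pvCut_none _ _ hf]
    simp
  · obtain ⟨hge, hpre, hlen⟩ := pv_find_nonneg_parts full_text.toList hf
    obtain ⟨q, r, hq⟩ : ∃ q r,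
        pvSpGo (full_text.toList.drop
          ((PySem.Chars.find full_text.toList pvDelim).toNat + pvDelim.length)) = q :: r := by
      cases h' : pvSpGo (full_text.toList.drop
          ((PySem.Chars.find full_text.toList pvDelim).toNat + pvDelim.length)) with
      | nil => exact absurd h' (pv_spGo_ne_nil _)
      | cons q r => exact ⟨q, r, rfl⟩
    have hsp : pvSpGo full_text.toList
        = full_text.toList.take (PySem.Chars.find full_text.toList pvDelim).toNat :: q :: r := by
      rw [pv_spGo_eq, if_neg hf, hq]
    have hlen2 : 2 ≤ (pvSpGo full_text.toList).length := by rw [hsp]; simp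
    rw [if_neg (show ¬ (((pvSpGo full_text.toList).length : Int) ≤ 1) by omega)]
    congr 1
    rw [PySem.List.foldl_append_eq_flatMap, pv_cut_eq_join]
    have hhead : PySem.List.pyGetD (pvSpGo full_text.toList) 0 []
        = full_text.toList.take (PySem.Chars.find full_text.toList pvDelim).toNat := by
      rw [hsp, show ((0 : Int)) = (((0 : Nat) : Nat) : Int) from rfl, PySem.List.pyGetD_natCast]
      simp
    rw [hhead]
    by_cases hm : m ≤ 0
    · rw [pv_pyRange_nil _ _ (le_trans (min_le_right _ _) (by omega))]
      rw [hsp]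
      have h0 : m.toNat = 0 := by omega
      rw [h0]
      simp [pvJoin]
    · have hlenInt : (2 : Int) ≤ ((pvSpGo full_text.toList).length : Int) := by exact_mod_cast hlen2
      obtain ⟨nN, hnN⟩ : ∃ nN : Nat,
          (nN : Int) = min (((pvSpGo full_text.toList).length : Int)) (m + 1) - 1 :=
        ⟨(min (((pvSpGo full_text.toList).length : Int)) (m + 1) - 1).toNat, by omega⟩
      have happ := pv_range_flatMap (pvSpGo full_text.toList) nN 1 (by omega)
      push_cast at happ
      have hrepl : min (((pvSpGo full_text.toList).length : Int)) (m + 1) = 1 + (nN : Int) := by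
        omega
      have hlenN : (pvSpGo full_text.toList).length = r.length + 2 := by
        rw [hsp]; simp
      have htake : (q :: r).take nN = (q :: r).take m.toNat := by
        by_cases hcmp : (m + 1) ≤ (((pvSpGo full_text.toList).length : Int))
        · have : nN = m.toNat := by omega
          rw [this]
        · have h1 : nN = r.length + 1 := by omega
          have h2 : r.length + 1 ≤ m.toNat := by omega
          rw [h1, List.take_of_length_le (by simp), List.take_of_length_le (by simp; omega)]
      rw [hrepl, happ, hsp, pvJoin_eq_flatMap, List.drop_one, List.tail_cons, htake]

lemma pv_L (s : List Char) : ∀ (k : Nat) (m : Int) (pos : Nat), m.toNat = k →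
    pvDelim <+: s.drop pos →
    limit_pages_altLoop s pos m =
      if m ≤ 0 then s.take pos
      else s.take (pos + pvDelim.length) ++ pvCut (s.drop (pos + pvDelim.length)) (m - 1) := by
  intro k
  induction k using Nat.strong_induction_on with
  | _ k ih =>
    intro m pos hk hpre
    have hposlen : pos + pvDelim.length ≤ s.length := by
      have h1 := hpre.length_le
      simp only [List.length_drop, pvDelim_len] at h1 ⊢
      omega
    rw [limit_pages_altLoop]
    by_cases hm : m ≤ 0
    · rw [if_neg (show ¬ (0 : Int) < m by omega), if_pos hm]
      rw [PySem.Chars.slice_eq_listSlice, PySem.List.slice_to_natCast]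
    · rw [if_pos (show (0 : Int) < m by omega), if_neg hm]
      have hcast : ((pos : Int) + (pvDelim.length : Int)) = ((pos + pvDelim.length : Nat) : Int) := by
        push_cast; ring
      rw [hcast, PySem.Chars.findFrom_natCast s pvDelim _ hposlen]
      by_cases hj : PySem.Chars.find (s.drop (pos + pvDelim.length)) pvDelim = -1
      · rw [if_pos hj]
        try rw [if_pos rfl]
        try rw [pvCut_none _ _ hj]
        try rw [List.take_append_drop]
      · obtain ⟨hge, hpre', hlen'⟩ := pv_find_nonneg_parts (s.drop (pos + pvDelim.length)) hj
        rw [if_neg hj]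
        set j := PySem.Chars.find (s.drop (pos + pvDelim.length)) pvDelim with hjdef
        have hne : ¬ (((pos + pvDelim.length : Nat) : Int) + j = -1) := by
          push_cast; omega
        rw [if_neg hne]
        have hposN : (((pos + pvDelim.length : Nat) : Int) + j).toNat
            = pos + pvDelim.length + j.toNat := by omega
        have heq0 : (s.drop (pos + pvDelim.length)).drop j.toNat
            = s.drop (pos + pvDelim.length + j.toNat) := by
          rw [List.drop_drop]
          try congr 1
          try omega
        have hinv : pvDelim <+: s.drop (pos + pvDelim.length + j.toNat) := heq0 ▸ hpre'
        have hlt : (m - 1).toNat < k := by omega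
        rw [hposN]
        rw [ih (m - 1).toNat hlt (m - 1) (pos + pvDelim.length + j.toNat) rfl hinv]
        rw [pvCut_found (s.drop (pos + pvDelim.length)) (m - 1) (by rw [← hjdef]; exact hj),
          ← hjdef]
        by_cases hm1 : m - 1 ≤ 0
        · rw [if_pos hm1]
          try rw [if_pos hm1]
          try rw [List.take_add]
        · rw [if_neg hm1]
          try rw [if_neg hm1]
          have e1 : s.take (pos + pvDelim.length + j.toNat + pvDelim.length)
              = s.take (pos + pvDelim.length) ++
                (s.drop (pos + pvDelim.length)).take (j.toNat + pvDelim.length) := by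
            rw [← List.take_add]
            try congr 1
            try omega
          have e2 : s.drop (pos + pvDelim.length + j.toNat + pvDelim.length)
              = (s.drop (pos + pvDelim.length)).drop (j.toNat + pvDelim.length) := by
            rw [List.drop_drop]
            try congr 1
            try omega
          try rw [e1, e2, List.append_assoc]

lemma pv_B_eq (full_text : String) (m : Int) :
    limit_pages_alt full_text m = String.ofList (pvCut full_text.toList m) := by
  simp only [limit_pages_alt]
  by_cases hf : PySem.Chars.find full_text.toList pvDelim = -1
  · rw [if_pos hf, pvCut_none _ _ hf]
    simp
  · rw [if_neg hf]
    obtain ⟨hge, hpre, hlen⟩ := pv_find_nonneg_parts full_text.toList hf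
    rw [pv_L full_text.toList m.toNat m (PySem.Chars.find full_text.toList pvDelim).toNat rfl hpre]
    try congr 1
    try rw [pvCut_found _ _ hf]
    try exact rfl

-- ===== VERDICT (by name: the statement is the Claim_ definition above) =====
theorem limit_pages_spec : Claim_equal_limit_pages := by
  intro full_text max_pages _
  show limit_pages full_text max_pages = limit_pages_alt full_text max_pages
  rw [pv_A_eq, pv_B_eq]
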